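-- pv_equiv track=rewrite | github.com/909ma/Repository-for-Study | 프로그래머스/python/수열과 구간 쿼리 4.py | solution
-- ===== SOURCE A (Python) =====
-- def solution(arr, queries):
--     answer = []
--     for item in queries:
--         s, e, k = item
--         for i in range(s, e + 1):
--             if i % k:
--                 pass
--             else:
--                 arr[i] += 1
--     return arr
-- ===== SOURCE B (Python) =====
-- def solution(arr, queries):
--     # Mutates arr in place like the original; steps directly over the multiples of k.
--     for s, e, k in queries:
--         if s <= e:
--             m = abs(k)
--             start = s + (-s) % m
--             for i in range(start, e + 1, m):
--                 arr[i] += 1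
--     return arr
-- ===== Notes on version B (the rewrite author's own statement) =====
-- stated objective: simpler
-- what changed: Instead of scanning every index in [s,e] and testing i % k == 0, B computes the first multiple of k at or above s and strides over the multiples directly with range(start, e+1, abs(k)), so the modulo test disappears from the inner loop.
import Mathlib
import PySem

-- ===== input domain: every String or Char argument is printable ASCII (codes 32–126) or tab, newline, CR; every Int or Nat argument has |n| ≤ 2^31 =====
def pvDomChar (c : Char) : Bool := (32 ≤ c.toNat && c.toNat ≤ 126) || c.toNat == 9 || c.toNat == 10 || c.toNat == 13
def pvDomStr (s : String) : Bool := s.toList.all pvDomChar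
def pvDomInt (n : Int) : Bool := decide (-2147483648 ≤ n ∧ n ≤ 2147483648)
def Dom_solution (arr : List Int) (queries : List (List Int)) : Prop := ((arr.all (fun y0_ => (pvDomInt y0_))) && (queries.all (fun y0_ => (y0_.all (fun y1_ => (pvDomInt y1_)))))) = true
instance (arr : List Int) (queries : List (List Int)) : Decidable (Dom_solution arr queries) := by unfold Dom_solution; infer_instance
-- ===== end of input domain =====

-- B replaces A's scan-every-index-and-test-modulo inner loop by striding directly over the
-- multiples of k (objective: simpler; equivalence is about the return value — both Pythons
-- mutate arr in place identically).

-- ===== PORT A =====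
-- Python's 'arr[i] += 1' (read then write, negative indices wrap, none = IndexError)
def pyIncAtA (a : List Int) (i : Int) : Option (List Int) :=
  (PySem.List.pyGet? a i).bind (fun v => PySem.List.pySet? a i (v + 1))

-- 'for i in range(s, e + 1): if i % k: pass else: arr[i] += 1'
def runQueryA (a : List Int) (s e k : Int) : Option (List Int) :=
  (PySem.List.pyRange s (e + 1) 1).foldl
    (fun acc i => acc.bind (fun a =>
      (PySem.Int.mod? i k).bind (fun r => if r ≠ 0 then some a else pyIncAtA a i)))
    (some a)

def solution (arr : List Int) (queries : List (List Int)) : List Int :=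
  (queries.foldl
    (fun acc q => acc.bind (fun a =>
      match q with
      | [s, e, k] => runQueryA a s e k
      | _ => none))
    (some arr)).getD arr

-- ===== PORT B =====
-- 'if s <= e: m = abs(k); start = s + (-s) % m; for i in range(start, e + 1, m): arr[i] += 1'
def runQueryB (a : List Int) (s e k : Int) : Option (List Int) :=
  if s ≤ e then
    (PySem.Int.mod? (-s) |k|).bind (fun r =>
      (PySem.List.pyRange (s + r) (e + 1) |k|).foldl
        (fun acc i => acc.bind (fun a =>
          (PySem.List.pyGet? a i).bind (fun v => PySem.List.pySet? a i (v + 1)))) (some a))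
  else some a

-- 'for s, e, k in queries' (a non-3-element query is a ValueError: none)
def solution_alt (arr : List Int) (queries : List (List Int)) : List Int :=
  (queries.foldl
    (fun acc q => acc.bind (fun a =>
      if q.length = 3 then runQueryB a (q.getD 0 0) (q.getD 1 0) (q.getD 2 0) else none))
    (some arr)).getD arr

-- ===== PRECONDITION & SPEC =====
-- Pre_ excludes exactly the inputs where the Python A raises: a query whose length is not 3
-- (ValueError on unpacking), k = 0 on a nonempty range (ZeroDivisionError), or a touched index
-- (a multiple of k in [s, e]: first s + (-s) % |k|, last e - e % |k|) outside [-len(arr), len(arr))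
-- (IndexError).
def Pre_solution (arr : List Int) (queries : List (List Int)) : Prop :=
  ∀ q ∈ queries, q.length = 3 ∧
    (q.getD 0 0 ≤ q.getD 1 0 →
      q.getD 2 0 ≠ 0 ∧
      (q.getD 0 0 + PySem.Int.mod (-(q.getD 0 0)) |q.getD 2 0| ≤ q.getD 1 0 →
        -(arr.length : Int) ≤ q.getD 0 0 + PySem.Int.mod (-(q.getD 0 0)) |q.getD 2 0| ∧
        q.getD 1 0 - PySem.Int.mod (q.getD 1 0) |q.getD 2 0| < (arr.length : Int)))
instance (arr : List Int) (queries : List (List Int)) : Decidable (Pre_solution arr queries) := by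
  unfold Pre_solution; infer_instance

def pvWitness_solution : List Int × List (List Int) := ([5, 6, 7], [[0, 2, 2], [-3, 1, 1]])

def Spec_solution (arr : List Int) (queries : List (List Int)) (out : List Int) : Prop := out = solution_alt arr queries
instance (arr : List Int) (queries : List (List Int)) (out : List Int) : Decidable (Spec_solution arr queries out) := by unfold Spec_solution; infer_instance

-- ===== CLAIM (what is proved, stated in full; the proofs are below) =====
def Claim_equal_solution : Prop := ∀ (arr : List Int) (queries : List (List Int)), Dom_solution arr queries → Pre_solution arr queries → Spec_solution arr queries (solution arr queries)

-- ===== LEMMAS AND PROOFS =====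

-- a fold whose step is 'acc.bind …' keeps 'none'
theorem bindFoldl_none (l : List Int) (f : Int → List Int → Option (List Int)) :
    l.foldl (fun acc i => acc.bind (fun a => f i a)) none = none := by
  induction l with
  | nil => rfl
  | cons x t ih => simpa using ih

-- s + (-s) % m is a multiple of m (m ≠ 0 not even needed for the algebra)
theorem start_dvd (s m : Int) : m ∣ s + PySem.Int.mod (-s) m :=
  ⟨-(PySem.Int.floordiv (-s) m), by
    have h := PySem.Int.floordiv_mul_add_mod (-s) m; linarith [h, mul_comm m (PySem.Int.floordiv (-s) m)]⟩

-- the key list identity: filtering [s, b) by divisibility by m IS the stride range from the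
-- first multiple of m at or above s
theorem stride_eq (m s b : Int) (hm : 0 < m) :
    (PySem.List.pyRange s b 1).filter (fun i => decide (m ∣ i)) =
      PySem.List.pyRange (s + PySem.Int.mod (-s) m) b m := by
  have hr0 : 0 ≤ PySem.Int.mod (-s) m := PySem.Int.mod_nonneg (-s) hm
  have hrm : PySem.Int.mod (-s) m < m := PySem.Int.mod_lt (-s) hm
  have hdvd : m ∣ s + PySem.Int.mod (-s) m := start_dvd s m
  -- both sides are strictly increasing, so it suffices to show equal membership
  have sorted₁ : ((PySem.List.pyRange s b 1).filter (fun i => decide (m ∣ i))).Pairwise (· < ·) :=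
    (PySem.List.pairwise_lt_pyRange_one s b).filter _
  have sorted₂ : (PySem.List.pyRange (s + PySem.Int.mod (-s) m) b m).Pairwise (· < ·) := by
    rw [PySem.List.pyRange_of_pos _ _ hm]
    refine List.Pairwise.map _ (fun a c h => ?_) (List.pairwise_lt_range)
    have : m * (a : Int) < m * (c : Int) := by
      apply mul_lt_mul_of_pos_left _ hm
      exact_mod_cast h
    omega
  have hmem : ∀ x : Int,
      x ∈ (PySem.List.pyRange s b 1).filter (fun i => decide (m ∣ i)) ↔
      x ∈ PySem.List.pyRange (s + PySem.Int.mod (-s) m) b m := by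
    intro x
    rw [List.mem_filter, PySem.List.mem_pyRange_one, PySem.List.mem_pyRange_iff_of_pos hm]
    simp only [decide_eq_true_eq]
    constructor
    · rintro ⟨⟨hsx, hxb⟩, hdx⟩
      have hds : m ∣ x - (s + PySem.Int.mod (-s) m) := (Int.dvd_sub hdx hdvd)
      refine ⟨?_, hxb, hds⟩
      by_contra hlt
      have hpos : 0 < s + PySem.Int.mod (-s) m - x := by omega
      have := Int.le_of_dvd hpos (Int.dvd_sub hdvd hdx)
      omega
    · rintro ⟨hsx, hxb, hds⟩
      have hdx : m ∣ x := by
        have := Int.dvd_add hds hdvd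
        simpa using this
      exact ⟨⟨by omega, hxb⟩, hdx⟩
  exact List.Perm.eq_of_pairwise (fun a b _ _ h1 h2 => absurd h2 (lt_asymm h1)) sorted₁ sorted₂
    ((List.perm_ext_iff_of_nodup (sorted₁.imp ne_of_lt) (sorted₂.imp ne_of_lt)).mpr hmem)

-- per query, the two inner loops agree (unconditionally)
theorem runQuery_eq (a : List Int) (s e k : Int) : runQueryA a s e k = runQueryB a s e k := by
  unfold runQueryA runQueryB
  by_cases hse : s ≤ e
  · rw [if_pos hse]
    by_cases hk : k = 0
    · subst hk
      have h1 : PySem.Int.mod? s (0:Int) = none := by simp [PySem.Int.mod?]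
      have h2 : PySem.Int.mod? (-s) |(0:Int)| = none := by simp [PySem.Int.mod?]
      rw [PySem.List.pyRange_one_cons (by omega : s < e + 1), List.foldl_cons,
        Option.bind_some, h1, Option.bind_none, bindFoldl_none, h2, Option.bind_none]
    · have hm : 0 < |k| := abs_pos.mpr hk
      have hmod : PySem.Int.mod? (-s) |k| = some (PySem.Int.mod (-s) |k|) := by
        unfold PySem.Int.mod? PySem.Int.mod
        rw [if_neg (by simpa using hk)]
      rw [hmod, Option.bind_some]
      have hinner : ∀ (a : List Int) (i : Int),
          (PySem.Int.mod? i k).bind (fun r => if r ≠ 0 then some a else pyIncAtA a i)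
          = if |k| ∣ i then pyIncAtA a i else some a := by
        intro a i
        have hmi : PySem.Int.mod? i k = some (PySem.Int.mod i k) := by
          unfold PySem.Int.mod? PySem.Int.mod
          rw [if_neg hk]
        rw [hmi, Option.bind_some]
        by_cases hd : |k| ∣ i
        · have h0 : PySem.Int.mod i k = 0 := (PySem.Int.mod_eq_zero_iff_dvd i k).mpr ((abs_dvd k i).mp hd)
          simp [h0, hd]
        · have h0 : PySem.Int.mod i k ≠ 0 := fun h =>
            hd ((abs_dvd k i).mpr ((PySem.Int.mod_eq_zero_iff_dvd i k).mp h))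
          simp [h0, hd]
      have hstep : ∀ (acc : Option (List Int)) (i : Int),
          acc.bind (fun a => (PySem.Int.mod? i k).bind (fun r => if r ≠ 0 then some a else pyIncAtA a i))
          = if |k| ∣ i then acc.bind (fun a => pyIncAtA a i) else acc := by
        intro acc i
        simp only [hinner]
        by_cases hd : |k| ∣ i
        · simp [hd]
        · simp only [hd, if_false]
          cases acc <;> simp
      calc (PySem.List.pyRange s (e + 1) 1).foldl
              (fun acc i => acc.bind (fun a => (PySem.Int.mod? i k).bind (fun r => if r ≠ 0 then some a else pyIncAtA a i)))
              (some a)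
          = (PySem.List.pyRange s (e + 1) 1).foldl
              (fun acc i => if |k| ∣ i then acc.bind (fun a => pyIncAtA a i) else acc) (some a) := by
            exact PySem.List.foldl_congr_mem _ _ _ _ (fun acc i _ => hstep acc i)
        _ = ((PySem.List.pyRange s (e + 1) 1).filter (fun i => decide (|k| ∣ i))).foldl
              (fun acc i => acc.bind (fun a => pyIncAtA a i)) (some a) := by
            exact PySem.List.foldl_ite_eq_foldl_filter (fun i => |k| ∣ i) _ _ _
        _ = (PySem.List.pyRange (s + PySem.Int.mod (-s) |k|) (e + 1) |k|).foldl
              (fun acc i => acc.bind (fun a =>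
                (PySem.List.pyGet? a i).bind (fun v => PySem.List.pySet? a i (v + 1)))) (some a) := by
            rw [stride_eq _ _ _ hm]; rfl
  · rw [if_neg hse]
    rw [PySem.List.pyRange_one_eq_nil (by omega : e + 1 ≤ s)]
    rfl

-- ===== VERDICT (by name: the statement is the Claim_ definition above) =====
theorem solution_spec : Claim_equal_solution := by
  intro arr queries _dom _pre
  unfold Spec_solution solution solution_alt
  have hfun : ∀ (acc : Option (List Int)) (q : List Int),
      acc.bind (fun a => match q with | [s, e, k] => runQueryA a s e k | _ => none)
      = acc.bind (fun a =>
          if q.length = 3 then runQueryB a (q.getD 0 0) (q.getD 1 0) (q.getD 2 0) else none) := by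
    intro acc q
    congr 1
    funext a
    rcases q with _ | ⟨s, _ | ⟨e, _ | ⟨k, _ | t⟩⟩⟩ <;> simp [runQuery_eq]
  rw [show (fun (acc : Option (List Int)) (q : List Int) =>
      acc.bind (fun a => match q with | [s, e, k] => runQueryA a s e k | _ => none))
    = (fun (acc : Option (List Int)) (q : List Int) =>
      acc.bind (fun a =>
        if q.length = 3 then runQueryB a (q.getD 0 0) (q.getD 1 0) (q.getD 2 0) else none))
    from funext fun acc => funext fun q => hfun acc q]
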